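-- pv_equiv track=rewrite | github.com/amspezia/K-Fold-Partitioning-Methods | kfoldmethods/splitters/utils.py | circular_append
-- ===== SOURCE A (Python) =====
-- def circular_append(input_list, output_list, k):
--     i = 0
--     for x in input_list:
--         output_list[i].append(x)
--         if i < k-1:
--             i += 1
--         else:
--             i = 0
--     return(output_list)
-- ===== SOURCE B (Python) =====
-- def circular_append(input_list, output_list, k):
--     # bucket-wise: each of the first k buckets receives its strided slice input_list[j::k]
--     for j, bucket in enumerate(output_list[:k]):
--         bucket.extend(input_list[j::k])
--     return output_list
-- ===== Notes on version B (the rewrite author's own statement) =====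
-- stated objective: alternative
-- what changed: replaces the single element-wise pass with a cycling counter by k bucket-wise passes, each appending the strided slice input_list[j::k] to output_list[j]
-- outside the precondition, e.g. on circular_append([1, 2], [[]], 0): A returns [[1, 2]], B returns [[]]; on circular_append([7], [[], []], -2): A returns [[7], []], B returns [[], []]
import Mathlib
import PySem

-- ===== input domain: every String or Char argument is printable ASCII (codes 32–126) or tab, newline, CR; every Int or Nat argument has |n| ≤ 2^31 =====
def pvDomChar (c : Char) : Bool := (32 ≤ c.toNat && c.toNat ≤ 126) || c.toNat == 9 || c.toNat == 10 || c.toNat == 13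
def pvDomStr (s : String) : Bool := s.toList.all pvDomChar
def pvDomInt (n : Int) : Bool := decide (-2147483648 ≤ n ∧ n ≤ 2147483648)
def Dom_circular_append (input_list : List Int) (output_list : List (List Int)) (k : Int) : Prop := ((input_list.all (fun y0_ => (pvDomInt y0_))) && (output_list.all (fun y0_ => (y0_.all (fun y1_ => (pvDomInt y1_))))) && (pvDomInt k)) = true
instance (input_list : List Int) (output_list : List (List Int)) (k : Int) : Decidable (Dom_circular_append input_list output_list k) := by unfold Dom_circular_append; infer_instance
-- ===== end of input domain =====

-- B distributes bucket-wise via strided slices input_list[j::k] instead of A's element-wise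
-- pass with a cycling counter (objective: alternative). Both Pythons mutate output_list in
-- place and return it; inside Pre_ the mutation is identical, and the equivalence proved
-- here is about the return value.

-- ===== PORT A =====
-- output_list[i].append(x) is modelled by List.modify (in range on every input of Pre_,
-- where Python's indexing cannot raise).
def circular_append (input_list : List Int) (output_list : List (List Int)) (k : Int) : List (List Int) :=
  (input_list.foldl
    (fun (st : List (List Int) × Int) x =>
      (st.1.modify st.2.toNat (fun b => b ++ [x]),
       if st.2 < k - 1 then st.2 + 1 else 0))
    (output_list, 0)).1

-- ===== PORT B =====
-- bucket.extend(input_list[j::k]) mutates the j-th inner list, modelled by List.modify at j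
-- on the result; inside the loop 1 ≤ k (enumerate of output_list[:k] is empty otherwise),
-- so the slice step is never 0 and the .getD [] default is never taken.
def circular_append_alt (input_list : List Int) (output_list : List (List Int)) (k : Int) : List (List Int) :=
  (PySem.List.enumerate (PySem.List.slice output_list none (some k)) 0).foldl
    (fun acc p =>
      acc.modify p.1.toNat (fun b => b ++ (PySem.List.slice? input_list (some p.1) none k).getD []))
    output_list

-- ===== PRECONDITION & SPEC =====
-- Pre_ keeps the splitter's natural domain, k ≥ 1 folds, and within it exactly the inputs
-- where A returns (enough buckets for the elements to be placed; otherwise A raises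
-- IndexError when the counter reaches a missing bucket).  The only returning inputs it
-- excludes have k ≤ 0, outside the natural domain, where A's value — every element dumped
-- into bucket 0 by the leftover counter — is an accident of the counter update, while B
-- follows Python's slice semantics for a nonpositive k (usually changing nothing).
def Pre_circular_append (input_list : List Int) (output_list : List (List Int)) (k : Int) : Prop :=
  1 ≤ k ∧ min (input_list.length : Int) k ≤ (output_list.length : Int)
instance (input_list : List Int) (output_list : List (List Int)) (k : Int) : Decidable (Pre_circular_append input_list output_list k) := by unfold Pre_circular_append; infer_instance
def pvWitness_circular_append : List Int × List (List Int) × Int := ([1, 2, 3, 4, 5], [[0], [], []], 3)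
def Spec_circular_append (input_list : List Int) (output_list : List (List Int)) (k : Int) (out : List (List Int)) : Prop := out = circular_append_alt input_list output_list k
instance (input_list : List Int) (output_list : List (List Int)) (k : Int) (out : List (List Int)) : Decidable (Spec_circular_append input_list output_list k out) := by unfold Spec_circular_append; infer_instance

-- ===== CLAIM (what is proved, stated in full; the proofs are below) =====
def Claim_equal_circular_append : Prop := ∀ (input_list : List Int) (output_list : List (List Int)) (k : Int), Dom_circular_append input_list output_list k → Pre_circular_append input_list output_list k → Spec_circular_append input_list output_list k (circular_append input_list output_list k)

-- ===== LEMMAS AND PROOFS =====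

-- every k-th element of l, starting with its head
def everyK (l : List Int) (k : Nat) : List Int :=
  match l with
  | [] => []
  | x :: t => x :: everyK (t.drop (k - 1)) k
termination_by l.length
decreasing_by simp

-- common specification: bucket j (j < k) receives every k-th element of inp starting at
-- offset (j - i) mod k, written without mod; i is the current counter
def distrib (inp : List Int) (out : List (List Int)) (i k : Nat) : List (List Int) :=
  out.mapIdx (fun j b =>
    if j < k then b ++ everyK (inp.drop (if i ≤ j then j - i else j + k - i)) k else b)

theorem mapIdx_id_elems (l : List (List Int)) : l.mapIdx (fun _ b => b) = l := by
  apply List.ext_getElem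
  · simp
  · intro i h1 h2; simp [List.getElem_mapIdx]

theorem everyK_nil (k : Nat) : everyK [] k = [] := by simp [everyK]

theorem everyK_cons (x : Int) (t : List Int) (k : Nat) :
    everyK (x :: t) k = x :: everyK (t.drop (k - 1)) k := by
  simp [everyK]

-- B's bucket loop, after the slices are rewritten, is distrib with counter 0
theorem foldB_eq_distrib (m K : Nat) (inp : List Int) (out : List (List Int)) :
    (List.range m).foldl (fun acc j => acc.modify j (fun b => b ++ everyK (inp.drop j) K)) out
      = out.mapIdx (fun j b => if j < m then b ++ everyK (inp.drop j) K else b) := by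
  induction m with
  | zero => simp [mapIdx_id_elems]
  | succ m ih =>
    rw [List.range_succ, List.foldl_append, ih]
    simp only [List.foldl_cons, List.foldl_nil]
    apply List.ext_getElem
    · simp
    · intro i h1 h2
      rw [List.getElem_modify]
      simp only [List.getElem_mapIdx]
      by_cases him : i = m
      · subst him; simp
      · rw [if_neg (by omega)]
        by_cases hlt : i < m
        · rw [if_pos hlt, if_pos (by omega)]
        · rw [if_neg hlt, if_neg (by omega)]

-- one step of A's loop, seen through distrib
theorem distrib_step (x : Int) (xs : List Int) (out : List (List Int)) (i k : Nat)
    (hk : 0 < k) (hi : i < k) :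
    distrib (x :: xs) out i k
      = distrib xs (out.modify i (fun b => b ++ [x])) (if i + 1 < k then i + 1 else 0) k := by
  unfold distrib
  apply List.ext_getElem
  · simp
  · intro j h1 h2
    simp only [List.getElem_mapIdx, List.getElem_modify]
    by_cases hjk : j < k
    · rw [if_pos hjk, if_pos hjk]
      by_cases hji : i = j
      · subst hji
        rw [if_pos (le_refl i), if_pos rfl, Nat.sub_self, List.drop_zero, everyK_cons]
        have hd : (if (if i + 1 < k then i + 1 else 0) ≤ i then i - (if i + 1 < k then i + 1 else 0)
            else i + k - (if i + 1 < k then i + 1 else 0)) = k - 1 := by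
          split_ifs <;> omega
        rw [hd, List.append_assoc, List.singleton_append]
      · rw [if_neg hji]
        have hd1 : (if i ≤ j then j - i else j + k - i) ≥ 1 := by split_ifs <;> omega
        have hd2 : (if (if i + 1 < k then i + 1 else 0) ≤ j then j - (if i + 1 < k then i + 1 else 0)
            else j + k - (if i + 1 < k then i + 1 else 0))
            = (if i ≤ j then j - i else j + k - i) - 1 := by
          split_ifs <;> omega
        rw [hd2]
        congr 2
        generalize hg : (if i ≤ j then j - i else j + k - i) = d at hd1
        obtain ⟨d', rfl⟩ : ∃ d', d = d' + 1 := ⟨d - 1, by omega⟩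
        simp
    · rw [if_neg hjk, if_neg hjk, if_neg (by omega)]

-- A's fold from any counter i < k computes distrib
theorem foldA_eq_distrib (K : Int) (Kn : Nat) (hK : K = (Kn : Int)) (hk : 0 < Kn) :
    ∀ (inp : List Int) (out : List (List Int)) (i : Nat), i < Kn →
    (inp.foldl
      (fun (st : List (List Int) × Int) x =>
        (st.1.modify st.2.toNat (fun b => b ++ [x]),
         if st.2 < K - 1 then st.2 + 1 else 0))
      (out, (i : Int))).1 = distrib inp out i Kn := by
  intro inp
  induction inp with
  | nil =>
    intro out i hi
    simp [distrib, everyK_nil, mapIdx_id_elems]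
  | cons x xs ih =>
    intro out i hi
    rw [List.foldl_cons]
    have hpair : (((out, (i : Int)).1.modify (out, (i : Int)).2.toNat (fun b => b ++ [x]),
         if (out, (i : Int)).2 < K - 1 then (out, (i : Int)).2 + 1 else 0) : List (List Int) × Int)
        = (out.modify i (fun b => b ++ [x]),
           ((if i + 1 < Kn then i + 1 else 0 : Nat) : Int)) := by
      subst hK
      simp only [Int.toNat_natCast]
      congr 1
      by_cases hlt : i + 1 < Kn
      · rw [if_pos (by omega), if_pos hlt]; push_cast; ring
      · rw [if_neg (by omega), if_neg hlt]; simp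
    rw [hpair, ih _ _ (by split_ifs <;> omega), ← distrib_step x xs out i Kn hk hi]

-- the count the slice machinery uses, peeled by one stride step
theorem stride_cnt_succ (n j k : Nat) (hk : 0 < k) (hj : j < n) :
    (if j < n then (n - j + k - 1)/k else 0)
      = (if j + k < n then (n - (j + k) + k - 1)/k else 0) + 1 := by
  rw [if_pos hj]
  by_cases h : j + k < n
  · rw [if_pos h]
    have e1 : n - j + k - 1 = (n - (j + k) + k - 1) + k := by omega
    rw [e1, Nat.add_div_right _ hk]
  · rw [if_neg h]
    exact Nat.div_eq_of_lt_le (by omega) (by omega)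

theorem filterMap_stride (fuel : Nat) : ∀ (xs : List Int) (j k : Nat), 0 < k →
    xs.length - j ≤ fuel →
    (List.range (if j < xs.length then (xs.length - j + k - 1)/k else 0)).filterMap
      (fun m => xs[j + k * m]?) = everyK (xs.drop j) k := by
  induction fuel with
  | zero =>
    intro xs j k hk hf
    rw [if_neg (by omega), List.drop_eq_nil_of_le (by omega)]
    simp [everyK_nil]
  | succ fuel ih =>
    intro xs j k hk hf
    by_cases hj : j < xs.length
    · rw [stride_cnt_succ _ _ _ hk hj, List.range_succ_eq_map, List.filterMap_cons]
      have h0 : xs[j + k * 0]? = some xs[j] := by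
        simp
      rw [h0]
      rw [List.filterMap_map]
      have hfn : ((fun m => xs[j + k * m]?) ∘ Nat.succ) = fun m => xs[(j + k) + k * m]? := by
        funext m
        simp only [Function.comp]
        congr 1
        simp [Nat.succ_eq_add_one, Nat.mul_add]
        omega
      rw [hfn, ih xs (j + k) k hk (by omega)]
      rw [List.drop_eq_getElem_cons hj, everyK_cons, List.drop_drop,
        show j + 1 + (k - 1) = j + k by omega]
    · rw [if_neg hj, List.drop_eq_nil_of_le (by omega)]
      simp [everyK_nil]

-- input[j::k] (0 < k) is everyK of the j-th drop
theorem slice?_eq_everyK (xs : List Int) (j k : Nat) (hk : 0 < k) :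
    PySem.List.slice? xs (some (j : Int)) none (k : Int) = some (everyK (xs.drop j) k) := by
  unfold PySem.List.slice? PySem.List.sliceIndices
  rw [if_neg (by omega : ¬ ((k : Int) = 0))]
  simp only [if_neg (by omega : ¬ ((k : Int) < 0)), if_pos (by omega : (0:Int) < (k:Int)),
    if_neg (by omega : ¬ ((j : Int) < 0))]
  by_cases hj : j < xs.length
  · rw [min_eq_left (by exact_mod_cast Nat.le_of_lt hj)]
    rw [if_pos (by exact_mod_cast hj)]
    have hcnt : (((xs.length : Int) - j + k - 1) / k).toNat
        = (xs.length - j + k - 1) / k := by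
      rw [show ((xs.length : Int) - j + k - 1) = ((xs.length - j + k - 1 : Nat) : Int) by omega,
        ← Int.natCast_div, Int.toNat_natCast]
    rw [hcnt]
    have hfn : (fun m : Nat => xs[((j : Int) + k * m).toNat]?) = fun m : Nat => xs[j + k * m]? := by
      funext m
      rw [show ((j : Int) + k * m) = ((j + k * m : Nat) : Int) by push_cast; ring,
        Int.toNat_natCast]
    rw [hfn, ← filterMap_stride (xs.length - j) xs j k hk (le_refl _), if_pos hj]
  · rw [min_eq_right (by exact_mod_cast Nat.le_of_not_lt hj)]
    rw [if_neg (by omega : ¬ ((xs.length : Int) < (xs.length : Int)))]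
    rw [List.drop_eq_nil_of_le (by omega)]
    simp [everyK_nil]

theorem circular_append_eq_alt (input_list : List Int) (output_list : List (List Int)) (k : Int)
    (h1 : 1 ≤ k) :
    circular_append input_list output_list k = circular_append_alt input_list output_list k := by
  obtain ⟨Kn, rfl⟩ : ∃ n : Nat, k = (n : Int) := ⟨k.toNat, (Int.toNat_of_nonneg (by omega)).symm⟩
  have hk : 0 < Kn := by omega
  -- A side
  rw [show circular_append input_list output_list (Kn : Int)
      = (input_list.foldl
          (fun (st : List (List Int) × Int) x =>
            (st.1.modify st.2.toNat (fun b => b ++ [x]),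
             if st.2 < (Kn : Int) - 1 then st.2 + 1 else 0))
          (output_list, ((0 : Nat) : Int))).1 from by rw [circular_append]; norm_num]
  rw [foldA_eq_distrib (Kn : Int) Kn rfl hk input_list output_list 0 hk]
  -- B side
  rw [circular_append_alt, PySem.List.slice_to_natCast output_list Kn]
  rw [← List.foldl_map (f := fun p : Int × List Int => p.1)
      (g := fun (acc : List (List Int)) (j : Int) =>
        acc.modify j.toNat (fun b => b ++ (PySem.List.slice? input_list (some j) none ((Kn : Nat) : Int)).getD []))]
  rw [PySem.List.map_fst_enumerate]
  rw [PySem.List.foldl_congr_mem _ _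
    (fun acc j => acc.modify j.toNat (fun b => b ++ everyK (input_list.drop j.toNat) Kn)) _
    (by
      intro acc j hj
      rw [PySem.List.mem_pyRange_one] at hj
      have hjn : j = ((j.toNat : Nat) : Int) := by omega
      rw [hjn, slice?_eq_everyK input_list j.toNat Kn hk]
      rfl)]
  rw [PySem.List.pyRange_one, List.foldl_map]
  have hsimp : (fun (acc : List (List Int)) (m : Nat) =>
      acc.modify ((0 : Int) + (m : Int)).toNat (fun b => b ++ everyK (input_list.drop ((0 : Int) + (m : Int)).toNat) Kn))
      = fun acc m => acc.modify m (fun b => b ++ everyK (input_list.drop m) Kn) := by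
    funext acc m
    norm_num
  rw [show ((0 + ((output_list.take Kn).length : Int) - 0).toNat) = min Kn output_list.length by
        simp [List.length_take]; omega,
    hsimp, foldB_eq_distrib (min Kn output_list.length) Kn input_list output_list]
  -- both sides are the same bucket-wise description of the result
  unfold distrib
  apply List.ext_getElem
  · simp
  · intro j h1 h2
    simp only [List.getElem_mapIdx]
    have hj : j < output_list.length := by simpa using h1
    rw [if_pos (Nat.zero_le j), Nat.sub_zero]
    by_cases hjk : j < Kn
    · rw [if_pos hjk, if_pos (by omega)]
    · rw [if_neg hjk, if_neg (by omega)]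

-- ===== VERDICT (by name: the statement is the Claim_ definition above) =====
theorem circular_append_spec : Claim_equal_circular_append := by
  intro input_list output_list k _ hpre
  unfold Spec_circular_append
  exact circular_append_eq_alt input_list output_list k hpre.1
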